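-- pv_equiv track=rewrite | github.com/kev1n/AdventOfCode | AdventOfCode/day9/main.py | getPossible
-- ===== SOURCE A (Python) =====
-- def getPossible(listOfNum, possible):
--   trueFalse = False
--   listOfNum = listOfNum[(len(listOfNum)-25):]
--   for i in listOfNum:
--     for z in listOfNum:
--       if i + z == possible:
--         trueFalse = True
--   return trueFalse
-- ===== SOURCE B (Python) =====
-- def getPossible(listOfNum, possible):
--   window = sorted(listOfNum[(len(listOfNum)-25):])
--   lo = 0
--   hi = len(window) - 1
--   while lo <= hi:
--     s = window[lo] + window[hi]
--     if s == possible: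
--       return True
--     if s < possible:
--       lo += 1
--     else:
--       hi -= 1
--   return False
-- ===== Notes on version B (the rewrite author's own statement) =====
-- stated objective: alternative
-- what changed: Replaces A's quadratic double loop over the last-25 window with sort-then-two-pointer: the window is sorted and scanned from both ends, moving the low pointer when the sum is too small and the high pointer when too large (lo == hi allowed, so self-pairing 2*x == possible still counts, as in A).
import Mathlib
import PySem

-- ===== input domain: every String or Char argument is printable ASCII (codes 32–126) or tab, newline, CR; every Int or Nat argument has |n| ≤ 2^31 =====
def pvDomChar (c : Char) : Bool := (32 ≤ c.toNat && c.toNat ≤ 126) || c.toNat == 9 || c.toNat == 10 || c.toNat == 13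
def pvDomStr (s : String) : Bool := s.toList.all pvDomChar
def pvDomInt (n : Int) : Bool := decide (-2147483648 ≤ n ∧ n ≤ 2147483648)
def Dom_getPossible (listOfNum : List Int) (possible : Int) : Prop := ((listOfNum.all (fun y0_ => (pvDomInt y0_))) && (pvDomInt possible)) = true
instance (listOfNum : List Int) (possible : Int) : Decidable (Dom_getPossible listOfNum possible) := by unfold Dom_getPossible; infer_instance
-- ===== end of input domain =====

-- B replaces A's quadratic double loop over the last-25 window with sort-then-two-pointer
-- (lo == hi allowed so self-pairing counts, as in A's double loop); objective: alternative.


-- ===== PORT A =====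
def getPossible (listOfNum : List Int) (possible : Int) : Bool :=
  let w := PySem.List.slice listOfNum (some ((listOfNum.length : Int) - 25)) none
  w.foldl (fun tf i =>
    w.foldl (fun tf z => if i + z = possible then true else tf) tf) false

-- ===== PORT B =====
-- the two-pointer while loop of Source B, structurally recursive on a fuel that bounds the
-- iteration count (each step moves lo up or hi down, so (hi+1-lo).toNat iterations suffice);
-- indices stay in range (0 ≤ lo ≤ hi < length throughout), so getD with lo.toNat/hi.toNat
-- computes exactly Python's window[lo]/window[hi]
def tpLoop (w : List Int) (possible : Int) (lo hi : Int) : Nat → Bool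
  | 0 => false
  | fuel + 1 =>
    if lo ≤ hi then
      let s := w.getD lo.toNat 0 + w.getD hi.toNat 0
      if s = possible then true
      else if s < possible then tpLoop w possible (lo + 1) hi fuel
      else tpLoop w possible lo (hi - 1) fuel
    else false

def getPossible_alt (listOfNum : List Int) (possible : Int) : Bool :=
  let window := PySem.List.sorted (PySem.List.slice listOfNum (some ((listOfNum.length : Int) - 25)) none) (fun x => x) false
  tpLoop window possible 0 ((window.length : Int) - 1) (window.length + 1)

-- ===== PRECONDITION & SPEC =====
def Spec_getPossible (listOfNum : List Int) (possible : Int) (out : Bool) : Prop := out = getPossible_alt listOfNum possible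
instance (listOfNum : List Int) (possible : Int) (out : Bool) : Decidable (Spec_getPossible listOfNum possible out) := by unfold Spec_getPossible; infer_instance

-- ===== CLAIM (what is proved, stated in full; the proofs are below) =====
def Claim_equal_getPossible : Prop := ∀ (listOfNum : List Int) (possible : Int), Dom_getPossible listOfNum possible → Spec_getPossible listOfNum possible (getPossible listOfNum possible)

-- ===== LEMMAS AND PROOFS =====

-- A's inner accumulator loop is acc || any
theorem foldl_if_or {α : Type} (l : List α) (p : α → Prop) [DecidablePred p] (acc : Bool) :
    l.foldl (fun tf z => if p z then true else tf) acc = (acc || l.any (fun z => decide (p z))) := by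
  induction l generalizing acc with
  | nil => simp
  | cons x xs ih =>
    simp only [List.foldl_cons, List.any_cons, ih]
    by_cases h : p x <;> simp [h]

theorem getPossible_eq_any (listOfNum : List Int) (possible : Int) :
    getPossible listOfNum possible =
      (PySem.List.slice listOfNum (some ((listOfNum.length : Int) - 25)) none).any
        (fun i => (PySem.List.slice listOfNum (some ((listOfNum.length : Int) - 25)) none).any
          (fun z => decide (i + z = possible))) := by
  unfold getPossible
  generalize (PySem.List.slice listOfNum (some ((listOfNum.length : Int) - 25)) none) = w
  have h : ∀ (v : List Int) (acc : Bool),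
      w.foldl (fun tf i => v.foldl (fun tf z => if i + z = possible then true else tf) tf) acc
        = (acc || w.any (fun i => v.any (fun z => decide (i + z = possible)))) := by
    intro v acc
    induction w generalizing acc with
    | nil => simp
    | cons x xs ih =>
      rw [List.foldl_cons, ih, foldl_if_or, List.any_cons]
      cases acc <;> simp
  simpa using h w false

-- two-pointer correctness on a getD-monotone list
theorem tpLoop_iff (w : List Int) (p : Int)
    (hmono : ∀ i j : Nat, i ≤ j → j < w.length → w.getD i 0 ≤ w.getD j 0) :
    ∀ (fuel : Nat) (lo hi : Int), (hi + 1 - lo).toNat ≤ fuel → 0 ≤ lo → hi < (w.length : Int) →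
      (tpLoop w p lo hi fuel = true ↔
        ∃ i j : Nat, lo ≤ (i : Int) ∧ i ≤ j ∧ (j : Int) ≤ hi ∧ w.getD i 0 + w.getD j 0 = p) := by
  intro fuel
  induction fuel with
  | zero =>
    intro lo hi hm hlo hhi
    rw [tpLoop]
    simp only [Bool.false_eq_true, false_iff]
    rintro ⟨i, j, h1, h2, h3, _⟩
    omega
  | succ fuel ih =>
    intro lo hi hm hlo hhi
    rw [tpLoop]
    by_cases hle : lo ≤ hi
    · simp only [if_pos hle]
      by_cases heq : w.getD lo.toNat 0 + w.getD hi.toNat 0 = p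
      · simp only [if_pos heq, true_iff]
        exact ⟨lo.toNat, hi.toNat, by omega, by omega, by omega, heq⟩
      · simp only [if_neg heq]
        by_cases hlt : w.getD lo.toNat 0 + w.getD hi.toNat 0 < p
        · rw [if_pos hlt, ih (lo + 1) hi (by omega) (by omega) hhi]
          constructor
          · rintro ⟨i, j, h1, h2, h3, h4⟩
            exact ⟨i, j, by omega, h2, h3, h4⟩
          · rintro ⟨i, j, h1, h2, h3, h4⟩
            refine ⟨i, j, ?_, h2, h3, h4⟩
            by_contra hc
            have hi_eq : i = lo.toNat := by omega
            have hjle : w.getD j 0 ≤ w.getD hi.toNat 0 := hmono j hi.toNat (by omega) (by omega)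
            rw [hi_eq] at h4
            omega
        · rw [if_neg hlt, ih lo (hi - 1) (by omega) hlo (by omega)]
          constructor
          · rintro ⟨i, j, h1, h2, h3, h4⟩
            exact ⟨i, j, h1, h2, by omega, h4⟩
          · rintro ⟨i, j, h1, h2, h3, h4⟩
            refine ⟨i, j, h1, h2, ?_, h4⟩
            by_contra hc
            have hj_eq : j = hi.toNat := by omega
            have hile : w.getD lo.toNat 0 ≤ w.getD i 0 := hmono lo.toNat i (by omega) (by omega)
            rw [hj_eq] at h4
            omega
    · rw [if_neg hle]
      simp only [Bool.false_eq_true, false_iff]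
      rintro ⟨i, j, h1, h2, h3, _⟩
      exact hle (by omega)

-- ===== VERDICT (by name: the statement is the Claim_ definition above) =====
theorem getPossible_spec : Claim_equal_getPossible := by
  intro listOfNum possible _
  unfold Spec_getPossible getPossible_alt
  rw [getPossible_eq_any]
  generalize hsl : (PySem.List.slice listOfNum (some ((listOfNum.length : Int) - 25)) none) = w0
  set w := PySem.List.sorted w0 (fun x => x) false with hw
  have hperm : w.Perm w0 := PySem.List.sorted_perm w0 (fun x => x) false
  have hmono : ∀ i j : Nat, i ≤ j → j < w.length → w.getD i 0 ≤ w.getD j 0 := by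
    intro i j hij hj
    have hi : i < w.length := lt_of_le_of_lt hij hj
    rw [List.getD_eq_getElem w 0 hi, List.getD_eq_getElem w 0 hj]
    exact PySem.List.sorted_id_getElem_mono w0 hij hj
  rw [Bool.eq_iff_iff, tpLoop_iff w possible hmono (w.length + 1) 0 ((w.length : Int) - 1) (by omega) le_rfl (by omega)]
  simp only [List.any_eq_true, decide_eq_true_eq]
  constructor
  · rintro ⟨x, hx, z, hz, hxz⟩
    have hx' : x ∈ w := hperm.mem_iff.mpr hx
    have hz' : z ∈ w := hperm.mem_iff.mpr hz
    obtain ⟨a, ha, hxa⟩ := List.getElem_of_mem hx'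
    obtain ⟨b, hb, hzb⟩ := List.getElem_of_mem hz'
    rcases le_total a b with hab | hab
    · exact ⟨a, b, by omega, hab, by omega,
        by rw [List.getD_eq_getElem w 0 ha, List.getD_eq_getElem w 0 hb, hxa, hzb]; exact hxz⟩
    · exact ⟨b, a, by omega, hab, by omega,
        by rw [List.getD_eq_getElem w 0 hb, List.getD_eq_getElem w 0 ha, hzb, hxa]; omega⟩
  · rintro ⟨i, j, _, hij, hj, hsum⟩
    have hj' : j < w.length := by omega
    have hi' : i < w.length := lt_of_le_of_lt hij hj'
    refine ⟨w[i], hperm.mem_iff.mp (List.getElem_mem hi'), w[j], hperm.mem_iff.mp (List.getElem_mem hj'), ?_⟩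
    rw [List.getD_eq_getElem w 0 hi', List.getD_eq_getElem w 0 hj'] at hsum
    exact hsum
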